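-- pv_equiv track=rewrite | github.com/Whitening-Sinabro/clouvel | src/clouvel/tools/manager/utils.py | _group_by_phase
-- ===== SOURCE A (Python) =====
-- from typing import Dict, Any, List, Set
--
-- def _group_by_phase(action_items: List[Dict[str, Any]]) -> Dict[str, List[Dict[str, Any]]]:
--     """Groups action items by phase."""
--     phases = {"Prepare": [], "Design": [], "Implement": [], "Verify": []}
--
--     for item in action_items:
--         phase = item.get("phase", "Verify")
--         if phase in phases:
--             phases[phase].append(item)
--         else:
--             phases["Verify"].append(item)
--
--     return phases
-- ===== SOURCE B (Python) =====
-- from typing import Dict, Any, List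
--
-- def _group_by_phase(action_items: List[Dict[str, Any]]) -> Dict[str, List[Dict[str, Any]]]:
--     """Groups action items by phase (one filtering pass per bucket)."""
--     return {
--         "Prepare": [i for i in action_items if i.get("phase", "Verify") == "Prepare"],
--         "Design": [i for i in action_items if i.get("phase", "Verify") == "Design"],
--         "Implement": [i for i in action_items if i.get("phase", "Verify") == "Implement"],
--         "Verify": [i for i in action_items
--                    if i.get("phase", "Verify") not in ("Prepare", "Design", "Implement")],
--     }
-- ===== Notes on version B (the rewrite author's own statement) =====
-- stated objective: simpler
-- what changed: Replaces A's single classifying pass that mutates four dict buckets with a dict literal of four independent filter comprehensions (one per phase; the Verify bucket keeps items whose phase is missing, unknown, or Verify).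
import Mathlib
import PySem

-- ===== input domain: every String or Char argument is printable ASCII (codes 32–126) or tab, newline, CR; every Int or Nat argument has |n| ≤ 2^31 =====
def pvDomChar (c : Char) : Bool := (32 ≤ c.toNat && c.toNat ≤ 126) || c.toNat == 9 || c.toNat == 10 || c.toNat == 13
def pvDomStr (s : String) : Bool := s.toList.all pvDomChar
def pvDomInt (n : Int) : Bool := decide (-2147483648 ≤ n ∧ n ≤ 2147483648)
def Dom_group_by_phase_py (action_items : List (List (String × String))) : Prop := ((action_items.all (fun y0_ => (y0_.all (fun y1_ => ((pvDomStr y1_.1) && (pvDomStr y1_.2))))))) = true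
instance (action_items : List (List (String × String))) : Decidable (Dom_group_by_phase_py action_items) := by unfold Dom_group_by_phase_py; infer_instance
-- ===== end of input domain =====

-- B replaces A's single classifying pass over a mutable dict of buckets by four
-- independent filter comprehensions, one per phase bucket (objective: simpler).

-- ===== PORT A =====
-- item.get("phase", "Verify"): first-match lookup in the item's association list
def pvGetPhase (item : List (String × String)) : String :=
  ((item.find? (fun kv => kv.1 == "phase")).map (·.2)).getD "Verify"

def group_by_phase_py (action_items : List (List (String × String))) : List (String × List (List (String × String))) :=
  (action_items.foldl
    (fun phases item =>
      let phase := pvGetPhase item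
      if phases.contains phase then
        phases.modify phase [] (fun l => l ++ [item])
      else
        phases.modify "Verify" [] (fun l => l ++ [item]))
    (PySem.Dict.ofList [("Prepare", []), ("Design", []), ("Implement", []), ("Verify", [])])).items

-- ===== PORT B =====
def group_by_phase_py_alt (action_items : List (List (String × String))) : List (String × List (List (String × String))) :=
  [("Prepare", action_items.filter (fun i => pvGetPhase i == "Prepare")),
   ("Design", action_items.filter (fun i => pvGetPhase i == "Design")),
   ("Implement", action_items.filter (fun i => pvGetPhase i == "Implement")),
   ("Verify", action_items.filter (fun i => !(["Prepare", "Design", "Implement"].contains (pvGetPhase i))))]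

-- ===== PRECONDITION & SPEC =====
def Spec_group_by_phase_py (action_items : List (List (String × String))) (out : List (String × List (List (String × String)))) : Prop := out = group_by_phase_py_alt action_items
instance (action_items : List (List (String × String))) (out : List (String × List (List (String × String)))) : Decidable (Spec_group_by_phase_py action_items out) := by unfold Spec_group_by_phase_py; infer_instance

-- ===== CLAIM (what is proved, stated in full; the proofs are below) =====
def Claim_equal_group_by_phase_py : Prop := ∀ (action_items : List (List (String × String))), Dom_group_by_phase_py action_items → Spec_group_by_phase_py action_items (group_by_phase_py action_items)

-- ===== LEMMAS AND PROOFS =====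

lemma step_eval (a b c d : List (List (String × String))) (i : List (String × String)) :
    (let phase := pvGetPhase i
     if (PySem.Dict.mk [("Prepare", a), ("Design", b), ("Implement", c), ("Verify", d)]).contains phase then
       (PySem.Dict.mk [("Prepare", a), ("Design", b), ("Implement", c), ("Verify", d)]).modify phase [] (fun l => l ++ [i])
     else
       (PySem.Dict.mk [("Prepare", a), ("Design", b), ("Implement", c), ("Verify", d)]).modify "Verify" [] (fun l => l ++ [i])) =
    PySem.Dict.mk
      [("Prepare", a ++ if pvGetPhase i = "Prepare" then [i] else []),
       ("Design", b ++ if pvGetPhase i = "Design" then [i] else []),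
       ("Implement", c ++ if pvGetPhase i = "Implement" then [i] else []),
       ("Verify", d ++ if pvGetPhase i = "Prepare" ∨ pvGetPhase i = "Design" ∨ pvGetPhase i = "Implement" then [] else [i])] := by
  by_cases h1 : pvGetPhase i = "Prepare"
  · simp [h1, PySem.Dict.contains, PySem.Dict.modify, PySem.Dict.get?, PySem.Dict.getD,
      PySem.Dict.insert]
  · by_cases h2 : pvGetPhase i = "Design"
    · simp [h2, PySem.Dict.contains, PySem.Dict.modify, PySem.Dict.get?, PySem.Dict.getD,
        PySem.Dict.insert]
    · by_cases h3 : pvGetPhase i = "Implement"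
      · simp [h3, PySem.Dict.contains, PySem.Dict.modify, PySem.Dict.get?, PySem.Dict.getD,
          PySem.Dict.insert]
      · by_cases h4 : pvGetPhase i = "Verify"
        · simp [h4, PySem.Dict.contains, PySem.Dict.modify, PySem.Dict.get?, PySem.Dict.getD,
            PySem.Dict.insert]
        · simp [h1, h2, h3, PySem.Dict.contains, PySem.Dict.modify, PySem.Dict.get?,
            PySem.Dict.getD, PySem.Dict.insert, Ne.symm h1, Ne.symm h2, Ne.symm h3, Ne.symm h4]

lemma group_inv (l : List (List (String × String)))
    (a b c d : List (List (String × String))) :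
    (l.foldl
      (fun phases item =>
        let phase := pvGetPhase item
        if phases.contains phase then
          phases.modify phase [] (fun l => l ++ [item])
        else
          phases.modify "Verify" [] (fun l => l ++ [item]))
      (PySem.Dict.mk [("Prepare", a), ("Design", b), ("Implement", c), ("Verify", d)])) =
    PySem.Dict.mk
      [("Prepare", a ++ l.filter (fun i => pvGetPhase i == "Prepare")),
       ("Design", b ++ l.filter (fun i => pvGetPhase i == "Design")),
       ("Implement", c ++ l.filter (fun i => pvGetPhase i == "Implement")),
       ("Verify", d ++ l.filter (fun i => !(["Prepare", "Design", "Implement"].contains (pvGetPhase i))))] := by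
  induction l generalizing a b c d with
  | nil => simp
  | cons i l ih =>
    rw [List.foldl_cons, step_eval, ih]
    by_cases h1 : pvGetPhase i = "Prepare"
    · simp [h1]
    · by_cases h2 : pvGetPhase i = "Design"
      · simp [h2]
      · by_cases h3 : pvGetPhase i = "Implement"
        · simp [h3]
        · simp [List.filter_cons, h1, h2, h3]

-- ===== VERDICT (by name: the statement is the Claim_ definition above) =====
theorem group_by_phase_py_spec : Claim_equal_group_by_phase_py := by
  intro l _
  unfold Spec_group_by_phase_py group_by_phase_py group_by_phase_py_alt
  rw [show PySem.Dict.ofList [("Prepare", ([] : List (List (String × String)))), ("Design", []), ("Implement", []), ("Verify", [])] =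
      PySem.Dict.mk [("Prepare", []), ("Design", []), ("Implement", []), ("Verify", [])] from rfl,
    group_inv]
  simp
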